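-- pv_equiv track=rewrite | github.com/EruvalaNavya/Data_Structures_training | Final year train/Day-12/ematchop1.py | matcheo
-- ===== SOURCE A (Python) =====
-- def matcheo(fl,i):
--     def add(j,s):
--         if j<len(l2):
--             if l2[j]%2!=0:
--                 s+=(l1[i]+l2[j])
--                 add(j+1,s)
--             else:
--                 add(j+1,s)
--         else:
--             fl.append(s)
--     if i<len(l1):
--         if l1[i]%2==0:
--             add(0,0)
--             matcheo(fl,i+1)
--         else:
--             matcheo(fl,i+1)
--     return fl
--
-- l1=[6,3,2,9,4,7]
--
-- l2=[8,7,5,3,6,9]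
-- ===== SOURCE B (Python) =====
-- l1=[6,3,2,9,4,7]
-- l2=[8,7,5,3,6,9]
--
-- def matcheo(fl,i):
--     # precompute count and sum of odd l2 elements once, then one pass over l1[i:]
--     odds=[x for x in l2 if x%2!=0]
--     c=len(odds)
--     t=sum(odds)
--     for idx in range(i,len(l1)):
--         v=l1[idx]
--         if v%2==0:
--             fl.append(c*v+t)
--     return fl
-- ===== Notes on version B (the rewrite author's own statement) =====
-- stated objective: simpler
-- what changed: A's two nested recursions (one recomputing the odd-l2 pair sums for every even l1 element) are replaced by precomputing the count and sum of odd l2 elements once and a single iterative pass over l1[i:]; Pre_ excludes i < -6, where Python's l1[i] raises IndexError in both programs.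
import Mathlib
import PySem

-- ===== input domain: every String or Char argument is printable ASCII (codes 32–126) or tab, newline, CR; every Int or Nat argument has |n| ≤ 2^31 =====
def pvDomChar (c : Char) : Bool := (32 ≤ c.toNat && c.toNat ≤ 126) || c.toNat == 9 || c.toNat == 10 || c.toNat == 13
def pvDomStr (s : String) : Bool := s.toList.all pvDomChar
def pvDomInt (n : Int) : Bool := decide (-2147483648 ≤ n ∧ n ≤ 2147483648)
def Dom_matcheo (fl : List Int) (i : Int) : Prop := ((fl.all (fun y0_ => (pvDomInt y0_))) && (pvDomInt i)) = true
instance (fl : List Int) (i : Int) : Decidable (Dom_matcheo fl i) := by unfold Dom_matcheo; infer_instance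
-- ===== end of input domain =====

-- B replaces A's nested recursions by a precomputed count/sum of the odd l2 elements
-- and one iterative pass over l1[i:] (simpler decomposition; same appends to fl).
-- In Python both A and B mutate fl in place via append — the mutation is identical;
-- the theorems below are about the returned value.

-- ===== PORT A =====
-- the module constants l1, l2
def pvL1 : List Int := [6, 3, 2, 9, 4, 7]
def pvL2 : List Int := [8, 7, 5, 3, 6, 9]

-- inner 'add(j, s)': walks l2 from index j, accumulating s; appends s to fl at the end.
-- 'vi' is l1[i] (getD 0 below; the out-of-range case is excluded by Pre_).
def pvAddA (vi : Int) (j : Nat) (s : Int) (fl : List Int) : List Int :=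
  if _h : j < pvL2.length then
    let x := pvL2[j]
    if PySem.Int.mod x 2 ≠ 0 then
      pvAddA vi (j + 1) (s + (vi + x)) fl
    else
      pvAddA vi (j + 1) s fl
  else
    fl ++ [s]
termination_by pvL2.length - j

def matcheo (fl : List Int) (i : Int) : List Int :=
  if _h : i < (pvL1.length : Int) then
    let vi := (PySem.List.pyGet? pvL1 i).getD 0  -- l1[i]; none (IndexError) excluded by Pre_
    if PySem.Int.mod vi 2 = 0 then
      matcheo (pvAddA vi 0 0 fl) (i + 1)
    else
      matcheo fl (i + 1)
  else
    fl
termination_by ((pvL1.length : Int) - i).toNat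
decreasing_by all_goals omega

-- ===== PORT B =====
def matcheo_alt (fl : List Int) (i : Int) : List Int :=
  let odds := pvL2.filter (fun x => PySem.Int.mod x 2 ≠ 0)
  let c : Int := odds.length
  let t : Int := odds.sum
  (PySem.List.pyRange i (pvL1.length : Int) 1).foldl
    (fun acc idx =>
      let v := (PySem.List.pyGet? pvL1 idx).getD 0  -- l1[idx]; in range by Pre_
      if PySem.Int.mod v 2 = 0 then acc ++ [c * v + t] else acc)
    fl

-- ===== PRECONDITION & SPEC =====
-- Pre_ excludes i < -6, exactly where Python's l1[i] raises IndexError (in A and in B alike);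
-- on every other input A returns normally.
def Pre_matcheo (fl : List Int) (i : Int) : Prop := -6 ≤ i
instance (fl : List Int) (i : Int) : Decidable (Pre_matcheo fl i) := by unfold Pre_matcheo; infer_instance
def pvWitness_matcheo : List Int × Int := ([1, 2], 0)

def Spec_matcheo (fl : List Int) (i : Int) (out : List Int) : Prop := out = matcheo_alt fl i
instance (fl : List Int) (i : Int) (out : List Int) : Decidable (Spec_matcheo fl i out) := by unfold Spec_matcheo; infer_instance

-- ===== CLAIM (what is proved, stated in full; the proofs are below) =====
def Claim_equal_matcheo : Prop := ∀ (fl : List Int) (i : Int), Dom_matcheo fl i → Pre_matcheo fl i → Spec_matcheo fl i (matcheo fl i)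

-- ===== LEMMAS AND PROOFS =====

-- for i past the end of l1 both programs return fl unchanged
theorem matcheo_ge (fl : List Int) (i : Int) (h : (6 : Int) ≤ i) :
    matcheo fl i = fl := by
  rw [matcheo]
  have h' : ¬ i < (pvL1.length : Int) := by simp [pvL1]; omega
  simp [h']

theorem matcheo_alt_ge (fl : List Int) (i : Int) (h : (6 : Int) ≤ i) :
    matcheo_alt fl i = fl := by
  unfold matcheo_alt
  rw [PySem.List.pyRange_one_eq_nil (by simp [pvL1]; omega)]
  simp

-- ===== VERDICT (by name: the statement is the Claim_ definition above) =====
theorem matcheo_spec : Claim_equal_matcheo := by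
  intro fl i _hdom hpre
  unfold Spec_matcheo
  by_cases h6 : (6 : Int) ≤ i
  · rw [matcheo_ge fl i h6, matcheo_alt_ge fl i h6]
  · have hlt : i < 6 := by omega
    have hge : -6 ≤ i := hpre
    interval_cases i <;>
      simp [matcheo, matcheo_alt, pvAddA, pvL1, pvL2, PySem.Int.mod, PySem.List.pyGet?,
            PySem.List.pyIdx?, PySem.List.pyRange, List.range_succ, Int.fmod]
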